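-- pv_equiv track=rewrite | github.com/posl/comment_recommendation | script/mod_gen/2_time/zh/281_C/5.py | getSong
-- ===== SOURCE A (Python) =====
-- def getSong(t, a):
--     num = len(a)
--     t = t % sum(a)
--     for i in range(num):
--         if t < a[i]:
--             return i+1, t
--         t -= a[i]
--     return -1, -1
-- ===== SOURCE B (Python) =====
-- def getSong(t, a):
--     # prefix sums once, then binary search for the first cumulative sum exceeding t
--     prefix = []
--     s = 0
--     for x in a:
--         s += x
--         prefix.append(s)
--     t %= s
--     lo, hi = 0, len(a)
--     while lo < hi:
--         mid = (lo + hi) // 2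
--         if prefix[mid] <= t:
--             lo = mid + 1
--         else:
--             hi = mid
--     return lo + 1, t - (prefix[lo - 1] if lo > 0 else 0)
-- ===== Notes on version B (the rewrite author's own statement) =====
-- stated objective: alternative
-- what changed: Replaces A's mutating linear scan (subtracting each duration from t) by a prefix-sum array plus a binary search for the first cumulative sum exceeding t; Pre_ restricts to the natural domain of nonnegative durations with positive total, where prefix sums are monotone (A raises ZeroDivisionError on zero total; on negative durations A's scan result is accidental).
-- outside the precondition, e.g. on getSong(2, [3, -2, 4]): A returns (1, 2), B returns (3, 1); on getSong(5, []): A raises ZeroDivisionError, B raises ZeroDivisionError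
import Mathlib
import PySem

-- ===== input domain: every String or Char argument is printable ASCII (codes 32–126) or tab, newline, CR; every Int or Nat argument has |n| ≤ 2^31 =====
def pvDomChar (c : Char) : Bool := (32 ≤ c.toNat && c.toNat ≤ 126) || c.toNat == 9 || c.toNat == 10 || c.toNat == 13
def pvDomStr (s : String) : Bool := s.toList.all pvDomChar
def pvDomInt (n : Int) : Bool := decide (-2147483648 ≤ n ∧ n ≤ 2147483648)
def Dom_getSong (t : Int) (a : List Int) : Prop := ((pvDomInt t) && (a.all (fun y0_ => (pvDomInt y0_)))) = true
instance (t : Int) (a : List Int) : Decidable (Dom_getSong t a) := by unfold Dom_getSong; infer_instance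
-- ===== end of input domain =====

-- B replaces A's mutating linear scan (subtracting each duration from t) by a prefix-sum array
-- plus a binary search for the first cumulative sum exceeding t; proved equal on the natural
-- domain of nonnegative durations with positive total.


-- ===== PORT A =====
-- the 'for i in range(num): if t < a[i]: return i+1, t; t -= a[i]' loop, index carried explicitly
def getSongGo (t : Int) (i : Int) : List Int → List Int
  | [] => [-1, -1]
  | x :: xs => if t < x then [i + 1, t] else getSongGo (t - x) (i + 1) xs

def getSong (t : Int) (a : List Int) : List Int :=
  getSongGo (PySem.Int.mod t a.sum) 0 a

-- ===== PORT B =====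
-- the 'for x in a: s += x; prefix.append(s)' loop of Source B: returns (prefix, s)
def prefixAndSum (s : Int) : List Int → List Int × Int
  | [] => ([], s)
  | x :: xs =>
    let r := prefixAndSum (s + x) xs
    ((s + x) :: r.1, r.2)

-- the 'while lo < hi' binary search of Source B ((lo+hi)//2 on the nonnegative ints lo, hi is
-- exactly Nat division; prefix[mid] always has 0 ≤ mid < len(prefix) when invoked by getSong_alt)
def bsearch (p : List Int) (t : Int) (lo hi : Nat) : Nat :=
  if h : lo < hi then
    let mid := (lo + hi) / 2
    if p.getD mid 0 ≤ t then bsearch p t (mid + 1) hi else bsearch p t lo mid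
  else lo
termination_by hi - lo
decreasing_by all_goals omega

def getSong_alt (t : Int) (a : List Int) : List Int :=
  let ps := prefixAndSum 0 a
  let t0 := PySem.Int.mod t ps.2
  let lo := bsearch ps.1 t0 0 a.length
  [(lo : Int) + 1, t0 - (if 0 < lo then ps.1.getD (lo - 1) 0 else 0)]

-- ===== PRECONDITION & SPEC =====
-- Pre_ = the natural domain: nonnegative durations with positive total. A raises
-- ZeroDivisionError when sum(a) == 0 (in particular on []); on lists containing a negative
-- duration the prefix sums are not monotone and A's scan result there is accidental.
def Pre_getSong (t : Int) (a : List Int) : Prop := (∀ x ∈ a, 0 ≤ x) ∧ 0 < a.sum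
instance (t : Int) (a : List Int) : Decidable (Pre_getSong t a) := by unfold Pre_getSong; infer_instance

def pvWitness_getSong : Int × List Int := (7, [3, 1, 4])

def Spec_getSong (t : Int) (a : List Int) (out : List Int) : Prop := out = getSong_alt t a
instance (t : Int) (a : List Int) (out : List Int) : Decidable (Spec_getSong t a out) := by unfold Spec_getSong; infer_instance

-- ===== CLAIM (what is proved, stated in full; the proofs are below) =====
def Claim_equal_getSong : Prop := ∀ (t : Int) (a : List Int), Dom_getSong t a → Pre_getSong t a → Spec_getSong t a (getSong t a)

-- ===== LEMMAS AND PROOFS =====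

-- sum of the first (k+1) elements (the k-th prefix sum)
def psum (xs : List Int) (k : Nat) : Int := (xs.take (k + 1)).sum

-- index of the first element of A's scan whose prefix sum exceeds t (length if none)
def firstHit (t : Int) : List Int → Nat
  | [] => 0
  | x :: xs => if t < x then 0 else firstHit (t - x) xs + 1

lemma prefixAndSum_snd (s : Int) (xs : List Int) : (prefixAndSum s xs).2 = s + xs.sum := by
  induction xs generalizing s with
  | nil => simp [prefixAndSum]
  | cons x xs ih => simp [prefixAndSum, ih]; ring

lemma prefixAndSum_length (s : Int) (xs : List Int) : (prefixAndSum s xs).1.length = xs.length := by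
  induction xs generalizing s with
  | nil => simp [prefixAndSum]
  | cons x xs ih => simp [prefixAndSum, ih]

lemma prefixAndSum_getD (s : Int) (xs : List Int) (k : Nat) (hk : k < xs.length) :
    (prefixAndSum s xs).1.getD k 0 = s + psum xs k := by
  induction xs generalizing s k with
  | nil => simp at hk
  | cons x xs ih =>
    cases k with
    | zero => simp [prefixAndSum, psum]
    | succ k =>
      simp only [prefixAndSum, List.getD_cons_succ]
      rw [ih (s + x) k (by simpa using hk)]
      simp [psum]; ring

lemma psum_mono (xs : List Int) (h : ∀ x ∈ xs, 0 ≤ x) {i j : Nat} (hij : i ≤ j) :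
    psum xs i ≤ psum xs j := by
  unfold psum
  rw [show xs.take (j + 1) = xs.take (i + 1) ++ ((xs.drop (i + 1)).take (j - i)) by
        rw [← List.take_add]; congr 1; omega]
  have h0 : 0 ≤ ((xs.drop (i + 1)).take (j - i)).sum := by
    apply List.sum_nonneg
    intro x hx
    exact h x (List.mem_of_mem_drop (List.mem_of_mem_take hx))
  simp [List.sum_append]; omega

-- binary-search invariant: with values monotone in the index, the result k keeps lo ≤ k ≤ hi,
-- everything below k is ≤ t and everything from k on (up to p.length) is > t.
lemma bsearch_spec (p : List Int) (t : Int)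
    (hsort : ∀ i j : Nat, i ≤ j → j < p.length → p.getD i 0 ≤ p.getD j 0) :
    ∀ (n lo hi : Nat), hi - lo ≤ n → lo ≤ hi → hi ≤ p.length →
    (∀ j < lo, p.getD j 0 ≤ t) → (∀ j, hi ≤ j → j < p.length → t < p.getD j 0) →
    lo ≤ bsearch p t lo hi ∧ bsearch p t lo hi ≤ hi ∧
    (∀ j < bsearch p t lo hi, p.getD j 0 ≤ t) ∧
    (∀ j, bsearch p t lo hi ≤ j → j < p.length → t < p.getD j 0) := by
  intro n
  induction n with
  | zero =>
    intro lo hi hn hle hhi hlow hhigh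
    have : ¬ lo < hi := by omega
    rw [bsearch]; simp only [this, dite_false]
    exact ⟨le_refl _, hle, hlow, fun j hj hjl => hhigh j (by omega) hjl⟩
  | succ n ih =>
    intro lo hi hn hle hhi hlow hhigh
    rw [bsearch]
    by_cases h : lo < hi
    · simp only [h, dite_true]
      have hm1 : lo ≤ (lo + hi) / 2 := by omega
      have hm2 : (lo + hi) / 2 < hi := by omega
      by_cases hc : p.getD ((lo + hi) / 2) 0 ≤ t
      · simp only [hc, if_true]
        have := ih ((lo + hi) / 2 + 1) hi (by omega) (by omega) hhi
          (fun j hj => le_trans (hsort j ((lo + hi) / 2) (by omega) (by omega)) hc)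
          hhigh
        exact ⟨by omega, this.2.1, this.2.2⟩
      · simp only [hc, if_false]
        rw [not_le] at hc
        have := ih lo ((lo + hi) / 2) (by omega) (by omega) (by omega) hlow
          (fun j hj hjl => lt_of_lt_of_le hc (hsort ((lo + hi) / 2) j hj hjl))
        exact ⟨this.1, by omega, this.2.2⟩
    · simp only [h, dite_false]
      exact ⟨le_refl _, hle, fun j hj => hlow j (by omega), fun j hj hjl => hhigh j (by omega) hjl⟩

lemma firstHit_le (t : Int) (xs : List Int) : firstHit t xs ≤ xs.length := by
  induction xs generalizing t with
  | nil => simp [firstHit]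
  | cons x xs ih =>
    by_cases hx : t < x
    · simp [firstHit, hx]
    · simpa [firstHit, hx] using ih (t - x)

lemma firstHit_lower (t : Int) (xs : List Int) :
    ∀ j < firstHit t xs, psum xs j ≤ t := by
  induction xs generalizing t with
  | nil => simp [firstHit]
  | cons x xs ih =>
    intro j hj
    simp only [firstHit] at hj
    split_ifs at hj with hx
    · omega
    · cases j with
      | zero => simpa [psum] using not_lt.mp hx
      | succ j =>
        have := ih (t - x) j (by omega)
        simp only [psum, List.take_succ_cons, List.sum_cons] at *
        omega

lemma firstHit_hit (t : Int) (xs : List Int) (h : firstHit t xs < xs.length) :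
    t < psum xs (firstHit t xs) := by
  induction xs generalizing t with
  | nil => simp at h
  | cons x xs ih =>
    by_cases hx : t < x
    · simpa [firstHit, hx, psum] using hx
    · simp only [firstHit, hx, if_false, List.length_cons, Nat.add_lt_add_iff_right] at h
      have := ih (t - x) h
      simp only [firstHit, hx, if_false, psum, List.take_succ_cons, List.sum_cons] at *
      omega

lemma firstHit_lt_of_ex (t : Int) (xs : List Int) (h : ∃ k < xs.length, t < psum xs k) :
    firstHit t xs < xs.length := by
  rcases h with ⟨k, hk, hkt⟩
  by_contra hc
  have heq : firstHit t xs = xs.length := le_antisymm (firstHit_le t xs) (by omega)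
  have := firstHit_lower t xs k (by omega)
  omega

-- A's loop returns the first-hit index (shifted by the carried i) and the residual time
lemma getSongGo_eq (xs : List Int) :
    ∀ t i, firstHit t xs < xs.length →
    getSongGo t i xs = [i + (firstHit t xs : Int) + 1, t - (xs.take (firstHit t xs)).sum] := by
  induction xs with
  | nil => intro t i h; simp at h
  | cons x xs ih =>
    intro t i h
    simp only [getSongGo, firstHit] at *
    split_ifs with hx
    · simp
    · simp only [hx, if_false] at h
      rw [ih (t - x) (i + 1) (by simpa using h)]
      simp only [List.take_succ_cons, List.sum_cons, List.cons.injEq, and_true]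
      push_cast
      omega

-- ===== VERDICT (by name: the statement is the Claim_ definition above) =====
theorem getSong_spec : Claim_equal_getSong := by
  intro t a _ hpre
  obtain ⟨hnn, hsum⟩ := hpre
  simp only [Spec_getSong, getSong, getSong_alt]
  have hne : a ≠ [] := by rintro rfl; simp at hsum
  have hn : 0 < a.length := List.length_pos_iff.mpr hne
  rw [prefixAndSum_snd, zero_add]
  set t0 := PySem.Int.mod t a.sum with ht0
  have ht0nn : 0 ≤ t0 := PySem.Int.mod_nonneg t hsum
  have ht0lt : t0 < a.sum := PySem.Int.mod_lt t hsum
  set p := (prefixAndSum 0 a).1 with hp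
  have hplen : p.length = a.length := prefixAndSum_length 0 a
  have hpget : ∀ k < a.length, p.getD k 0 = psum a k := by
    intro k hk; rw [hp, prefixAndSum_getD 0 a k hk, zero_add]
  have hsort : ∀ i j : Nat, i ≤ j → j < p.length → p.getD i 0 ≤ p.getD j 0 := by
    intro i j hij hj
    rw [hpget i (by omega), hpget j (by omega)]
    exact psum_mono a hnn hij
  -- the binary search result
  obtain ⟨_, hkhi, hklow, hkhigh⟩ :=
    bsearch_spec p t0 hsort a.length 0 a.length (by omega) (by omega) (by omega)
      (fun j hj => by omega) (fun j hj hjl => by omega)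
  set k := bsearch p t0 0 a.length with hk
  -- the linear-scan result
  have hex : ∃ j < a.length, t0 < psum a j := by
    refine ⟨a.length - 1, by omega, ?_⟩
    have : a.take (a.length - 1 + 1) = a := by
      rw [show a.length - 1 + 1 = a.length by omega]; exact List.take_length
    simpa [psum, this] using ht0lt
  have hf : firstHit t0 a < a.length := firstHit_lt_of_ex t0 a hex
  -- they coincide
  have hkf : k = firstHit t0 a := by
    by_contra hne'
    rcases Nat.lt_or_ge k (firstHit t0 a) with hlt | hge
    · have h1 := hkhigh k (le_refl _) (by omega)
      have h2 := firstHit_lower t0 a k hlt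
      rw [hpget k (by omega)] at h1; omega
    · have hlt : firstHit t0 a < k := by omega
      have h1 := hklow (firstHit t0 a) hlt
      have h2 := firstHit_hit t0 a hf
      rw [hpget (firstHit t0 a) (by omega)] at h1; omega
  rw [getSongGo_eq a t0 0 hf, hkf]
  congr 1
  · ring
  · congr 1
    by_cases h0 : 0 < firstHit t0 a
    · simp only [h0, if_true]
      rw [hpget (firstHit t0 a - 1) (by omega)]
      unfold psum
      rw [show firstHit t0 a - 1 + 1 = firstHit t0 a from by omega]
    · simp only [h0, if_false]
      have : firstHit t0 a = 0 := by omega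
      simp [this]
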